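-- pv_equiv track=rewrite | github.com/cpuglis1/red_teaming_challenge_openai_oss_20b | scripts/_obfuscation.py | space_out_digits
-- ===== SOURCE A (Python) =====
-- def space_out_digits(s: str, gap: str = " ") -> str:
--     out, buf = [], []
--     for ch in s:
--         if ch.isdigit():
--             buf.append(ch)
--         else:
--             if buf:
--                 out.append(gap.join(buf)); buf = []
--             out.append(ch)
--     if buf:
--         out.append(gap.join(buf))
--     return "".join(out)
-- ===== SOURCE B (Python) =====
-- def space_out_digits(s: str, gap: str = " ") -> str:
--     out = []
--     prev = False
--     for ch in s:
--         cur = ch.isdigit()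
--         if cur and prev:
--             out.append(gap)
--         out.append(ch)
--         prev = cur
--     return "".join(out)
-- ===== Notes on version B (the rewrite author's own statement) =====
-- stated objective: simpler
-- what changed: Replaces A's digit-run buffer with its flush-and-gap.join steps by a single pass keeping only a previous-char-was-digit flag and emitting the gap on the fly between adjacent digits.
import Mathlib
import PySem

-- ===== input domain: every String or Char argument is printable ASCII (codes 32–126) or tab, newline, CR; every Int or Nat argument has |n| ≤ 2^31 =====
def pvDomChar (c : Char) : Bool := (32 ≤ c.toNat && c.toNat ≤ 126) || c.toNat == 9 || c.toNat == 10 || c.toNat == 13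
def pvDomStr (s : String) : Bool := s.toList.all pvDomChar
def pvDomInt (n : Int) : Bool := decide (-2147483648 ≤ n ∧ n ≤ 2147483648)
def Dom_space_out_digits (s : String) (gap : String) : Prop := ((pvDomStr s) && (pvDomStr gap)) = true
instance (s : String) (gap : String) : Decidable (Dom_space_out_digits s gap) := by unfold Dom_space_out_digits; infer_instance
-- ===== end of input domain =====

-- B replaces A's run buffer + flush + gap.join with a single pass over the characters that
-- keeps only a previous-char-was-digit flag and emits the gap on the fly (objective: simpler).

-- ===== PORT A =====
-- A's loop body: append digit to buf; on a non-digit, flush buf as gap.join(buf) and append ch.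
def sodStepA (g : List Char) (st : List (List Char) × List Char) (ch : Char) :
    List (List Char) × List Char :=
  if PySem.Chars.isdigit ch then (st.1, st.2 ++ [ch])
  else ((if st.2 = [] then st.1
         else st.1 ++ [PySem.Chars.join g (st.2.map (fun c => [c]))]) ++ [[ch]], [])

def space_out_digits (s : String) (gap : String) : String :=
  let r := s.toList.foldl (sodStepA gap.toList) ([], [])
  String.ofList (PySem.Chars.join []
    (if r.2 = [] then r.1
     else r.1 ++ [PySem.Chars.join gap.toList (r.2.map (fun c => [c]))]))

-- ===== PORT B =====
-- B's loop body: cur = ch.isdigit(); if cur and prev, append gap; append ch; prev = cur.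
def sodStepB (g : List Char) (st : List (List Char) × Bool) (ch : Char) :
    List (List Char) × Bool :=
  let cur := PySem.Chars.isdigit ch
  ((if cur && st.2 then st.1 ++ [g] else st.1) ++ [[ch]], cur)

def space_out_digits_alt (s : String) (gap : String) : String :=
  String.ofList (PySem.Chars.join [] (s.toList.foldl (sodStepB gap.toList) ([], false)).1)

-- ===== PRECONDITION & SPEC =====
def Spec_space_out_digits (s : String) (gap : String) (out : String) : Prop := out = space_out_digits_alt s gap
instance (s : String) (gap : String) (out : String) : Decidable (Spec_space_out_digits s gap out) := by unfold Spec_space_out_digits; infer_instance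

-- ===== CLAIM (what is proved, stated in full; the proofs are below) =====
def Claim_equal_space_out_digits : Prop := ∀ (s : String) (gap : String), Dom_space_out_digits s gap → Spec_space_out_digits s gap (space_out_digits s gap)

-- ===== LEMMAS AND PROOFS =====

-- sep.join(xs ++ [p]) = sep.join(xs) ++ sep ++ p for nonempty xs
theorem sod_join_append (sep : List Char) (xs : List (List Char)) (p : List Char) (h : xs ≠ []) :
    PySem.Chars.join sep (xs ++ [p]) = PySem.Chars.join sep xs ++ sep ++ p := by
  induction xs with
  | nil => exact absurd rfl h
  | cons x xs ih =>
    cases xs with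
    | nil =>
      simp only [List.cons_append, List.nil_append, PySem.Chars.join_cons_cons,
        PySem.Chars.join_singleton]
    | cons y ys =>
      simp only [List.cons_append] at ih ⊢
      rw [PySem.Chars.join_cons_cons, PySem.Chars.join_cons_cons, ih (by simp)]
      simp [List.append_assoc]

-- "".join(out ++ [p]) appends p to "".join(out)
theorem sod_flat_append (xs : List (List Char)) (p : List Char) :
    PySem.Chars.join [] (xs ++ [p]) = PySem.Chars.join [] xs ++ p := by
  cases xs with
  | nil => simp [PySem.Chars.join_singleton]
  | cons x xs => simpa using sod_join_append [] (x :: xs) p (by simp)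

theorem sod_flat_append2 (xs : List (List Char)) (p q : List Char) :
    PySem.Chars.join [] (xs ++ [p, q]) = PySem.Chars.join [] xs ++ p ++ q := by
  rw [show xs ++ [p, q] = (xs ++ [p]) ++ [q] by simp, sod_flat_append, sod_flat_append]

-- what A still owes: the pending buffer, rendered with gap
def sodTail (g : List Char) (buf : List Char) : List Char :=
  if buf = [] then [] else PySem.Chars.join g (buf.map (fun c => [c]))

-- loop invariant: B's emitted characters = A's emitted characters ++ A's pending buffer (rendered)
theorem sod_inv (g : List Char) (l : List Char) :
    ∀ (outA outB : List (List Char)) (buf : List Char),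
    PySem.Chars.join [] outB = PySem.Chars.join [] outA ++ sodTail g buf →
    PySem.Chars.join [] (l.foldl (sodStepB g) (outB, !buf.isEmpty)).1
      = PySem.Chars.join [] (l.foldl (sodStepA g) (outA, buf)).1
        ++ sodTail g (l.foldl (sodStepA g) (outA, buf)).2 := by
  induction l with
  | nil => intro outA outB buf h; simpa using h
  | cons ch l ih =>
    intro outA outB buf h
    by_cases hd : PySem.Chars.isdigit ch = true
    · have hA : List.foldl (sodStepA g) (outA, buf) (ch :: l)
          = List.foldl (sodStepA g) (outA, buf ++ [ch]) l := by
        simp [sodStepA, hd]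
      by_cases hb : buf = []
      · subst hb
        have hB : List.foldl (sodStepB g) (outB, !([] : List Char).isEmpty) (ch :: l)
            = List.foldl (sodStepB g) (outB ++ [[ch]], !([] ++ [ch] : List Char).isEmpty) l := by
          simp [sodStepB, hd]
        rw [hA, hB]
        refine ih outA (outB ++ [[ch]]) ([] ++ [ch]) ?_
        rw [sod_flat_append, h]
        simp [sodTail, PySem.Chars.join_singleton]
      · have hbe : buf.isEmpty = false := by simpa [List.isEmpty_iff] using hb
        have hB : List.foldl (sodStepB g) (outB, !buf.isEmpty) (ch :: l)
            = List.foldl (sodStepB g) ((outB ++ [g]) ++ [[ch]], !(buf ++ [ch]).isEmpty) l := by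
          simp [sodStepB, hd, hbe, show (buf ++ [ch]).isEmpty = false from by simp]
        rw [hA, hB]
        refine ih outA ((outB ++ [g]) ++ [[ch]]) (buf ++ [ch]) ?_
        rw [sod_flat_append, sod_flat_append, h]
        have hne : buf ++ [ch] ≠ [] := by simp
        simp only [sodTail, if_neg hb, if_neg hne, List.map_append, List.map_cons, List.map_nil]
        rw [sod_join_append g (buf.map (fun c => [c])) [ch] (by simpa using hb)]
        simp [List.append_assoc]
    · have hA : List.foldl (sodStepA g) (outA, buf) (ch :: l)
          = List.foldl (sodStepA g)
              ((if buf = [] then outA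
                else outA ++ [PySem.Chars.join g (buf.map (fun c => [c]))]) ++ [[ch]], []) l := by
        simp [sodStepA, hd]
      have hB : List.foldl (sodStepB g) (outB, !buf.isEmpty) (ch :: l)
          = List.foldl (sodStepB g) (outB ++ [[ch]], !([] : List Char).isEmpty) l := by
        simp [sodStepB, hd]
      rw [hA, hB]
      refine ih _ (outB ++ [[ch]]) [] ?_
      rw [sod_flat_append, h]
      by_cases hb : buf = []
      · simp [hb, sodTail, sod_flat_append]
      · simp [sodTail, hb, sod_flat_append2, List.append_assoc]

-- ===== VERDICT (by name: the statement is the Claim_ definition above) =====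
theorem space_out_digits_spec : Claim_equal_space_out_digits := by
  intro s gap _
  unfold Spec_space_out_digits space_out_digits space_out_digits_alt
  dsimp only
  have h := sod_inv gap.toList s.toList [] [] [] (by simp [sodTail])
  simp only [List.isEmpty_nil, Bool.not_true] at h
  set r := s.toList.foldl (sodStepA gap.toList) ([], []) with hr
  by_cases hb : r.2 = []
  · rw [if_pos hb, h]
    simp [sodTail, hb]
  · rw [if_neg hb, h]
    simp [sodTail, hb, sod_flat_append]
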